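-- pv_equiv track=rewrite | github.com/singal22/ChangePassword | utils/helper.py | count_duplicate
-- ===== SOURCE A (Python) =====
-- import collections
--
-- def count_duplicate(password, num):
--     """
--     This function return true if exceeds allowed duplicate count
--     :param password: pwdrequirements
--     :param num: Number of duplicate repeating characters allowed
--     :return: True if more than allowed number
--     """
--
--     dic = collections.defaultdict(int)
--     duplicate = False
--     for c in password:
--         dic[c] += 1
--
--     for c in dic:
--         if dic[c] > num:
--             duplicate = True
--     return duplicate
-- ===== SOURCE B (Python) =====
-- def count_duplicate(password, num):
--     """Return True if some character occurs more than num times.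
--
--     Sorts the characters and scans once, tracking the length of the
--     current run of equal adjacent characters; no frequency map is built.
--     """
--     run = 0
--     prev = None
--     for c in sorted(password):
--         run = run + 1 if c == prev else 1
--         prev = c
--         if run > num:
--             return True
--     return False
-- ===== Notes on version B (the rewrite author's own statement) =====
-- stated objective: alternative
-- what changed: Replaces the defaultdict frequency map and second pass over its keys by sort-then-single-scan of runs of equal adjacent characters with early exit once a run exceeds num.
import Mathlib
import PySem

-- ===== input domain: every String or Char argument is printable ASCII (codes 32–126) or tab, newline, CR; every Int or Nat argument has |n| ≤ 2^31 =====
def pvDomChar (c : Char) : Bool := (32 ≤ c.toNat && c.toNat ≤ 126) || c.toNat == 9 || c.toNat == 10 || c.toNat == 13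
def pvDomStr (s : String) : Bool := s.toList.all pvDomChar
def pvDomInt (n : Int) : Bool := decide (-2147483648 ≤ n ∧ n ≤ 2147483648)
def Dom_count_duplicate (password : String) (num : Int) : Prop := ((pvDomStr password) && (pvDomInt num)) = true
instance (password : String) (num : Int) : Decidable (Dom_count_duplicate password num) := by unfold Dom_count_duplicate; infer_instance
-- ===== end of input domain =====

-- B replaces A's frequency map + key scan by sort-then-single-run-scan with early exit (alternative algorithm, same result).

-- ===== PORT A =====
def count_duplicate (password : String) (num : Int) : Bool :=
  let dic := password.toList.foldl (fun d c => d.modify c 0 (· + 1)) (PySem.Dict.empty : PySem.Dict Char Int)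
  let duplicate := false
  dic.keys.foldl (fun dup c => if dic.getD c 0 > num then true else dup) duplicate

-- ===== PORT B =====
-- the for-loop of Source B with its early return, as structural recursion over the sorted characters
def cdRun (num : Int) : List Char → Option Char → Int → Bool
  | [], _, _ => false
  | c :: rest, prev, run =>
    let run' := if some c == prev then run + 1 else 1
    if run' > num then true else cdRun num rest (some c) run'

def count_duplicate_alt (password : String) (num : Int) : Bool :=
  cdRun num (PySem.List.sorted password.toList (fun x => x) false) none 0

-- ===== PRECONDITION & SPEC =====
def Spec_count_duplicate (password : String) (num : Int) (out : Bool) : Prop := out = count_duplicate_alt password num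
instance (password : String) (num : Int) (out : Bool) : Decidable (Spec_count_duplicate password num out) := by unfold Spec_count_duplicate; infer_instance

-- ===== CLAIM (what is proved, stated in full; the proofs are below) =====
def Claim_equal_count_duplicate : Prop := ∀ (password : String) (num : Int), Dom_count_duplicate password num → Spec_count_duplicate password num (count_duplicate password num)

-- ===== LEMMAS AND PROOFS =====

-- 'if P then True-latch' fold = any
theorem foldl_if_or {α : Type} (P : α → Prop) [DecidablePred P] (l : List α) (b : Bool) :
    l.foldl (fun acc c => if P c then true else acc) b = (b || l.any fun c => decide (P c)) := by
  induction l generalizing b with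
  | nil => simp
  | cons x xs ih =>
    simp only [List.foldl_cons, List.any_cons, ih]
    by_cases h : P x <;> simp [h]

-- A returns true iff some character's count exceeds num
theorem countA_iff (xs : List Char) (num : Int) :
    (((xs.foldl (fun d c => d.modify c 0 (· + 1)) (PySem.Dict.empty : PySem.Dict Char Int)).keys.foldl
        (fun dup c => if (xs.foldl (fun d c => d.modify c 0 (· + 1)) (PySem.Dict.empty : PySem.Dict Char Int)).getD c 0 > num then true else dup) false) = true)
      ↔ ∃ c ∈ xs, num < (xs.count c : Int) := by
  rw [← PySem.Dict.counter_eq_foldl]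
  rw [foldl_if_or (fun c => (PySem.Dict.counter xs).getD c 0 > num)]
  simp only [Bool.false_or, List.any_eq_true, PySem.Dict.keys_counter, PySem.Dict.getD_counter,
    decide_eq_true_eq, gt_iff_lt]
  constructor
  · rintro ⟨c, hc, h⟩
    exact ⟨c, (PySem.Set.mem_ofList _ _).mp hc, h⟩
  · rintro ⟨c, hc, h⟩
    exact ⟨c, (PySem.Set.mem_ofList _ _).mpr hc, h⟩

-- run-scan invariant on a sorted tail whose elements all dominate the previous character p
theorem cdRun_some (num : Int) (l : List Char) : ∀ (p : Char) (run : Int),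
    l.Pairwise (· ≤ ·) → (∀ x ∈ l, p ≤ x) →
    (cdRun num l (some p) run = true ↔
      (0 < l.count p ∧ num < run + (l.count p : Int)) ∨ ∃ c ∈ l, c ≠ p ∧ num < (l.count c : Int)) := by
  induction l with
  | nil => intro p run _ _; simp [cdRun]
  | cons c rest ih =>
    intro p run hpw hge
    have hpw' : rest.Pairwise (· ≤ ·) := hpw.tail
    have hcle : ∀ x ∈ rest, c ≤ x := fun x hx => (List.pairwise_cons.mp hpw).1 x hx
    have hb : ((some c == some p) : Bool) = decide (c = p) := by
      by_cases h : c = p <;> simp [h]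
    simp only [cdRun, hb]
    by_cases hcp : c = p
    · subst hcp
      simp only [decide_eq_true_eq, if_true]
      have hcnt : ((c :: rest).count c : Int) = (rest.count c : Int) + 1 := by
        rw [List.count_cons_self]; push_cast; ring
      by_cases hgt : run + 1 > num
      · simp only [if_pos hgt, true_iff]
        left
        exact ⟨by simp [List.count_cons_self], by omega⟩
      · rw [if_neg hgt]
        rw [ih c (run + 1) hpw' hcle]
        constructor
        · rintro (⟨h1, h2⟩ | ⟨d, hd, hdne, hdc⟩)
          · left
            exact ⟨by simp [List.count_cons_self], by omega⟩
          · right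
            refine ⟨d, List.mem_cons_of_mem _ hd, hdne, ?_⟩
            rwa [List.count_cons_of_ne (Ne.symm hdne)]
        · rintro (⟨h1, h2⟩ | ⟨d, hd, hdne, hdc⟩)
          · by_cases hr : rest.count c = 0
            · exfalso; rw [hcnt] at h2; omega
            · left; exact ⟨Nat.pos_of_ne_zero hr, by omega⟩
          · right
            rcases List.mem_cons.mp hd with h | h
            · exact absurd h hdne
            · exact ⟨d, h, hdne, by rwa [List.count_cons_of_ne (Ne.symm hdne)] at hdc⟩
    · -- c ≠ p : run resets to 1; p never occurs again
      have hpc : p < c := lt_of_le_of_ne (hge c (List.mem_cons_self ..)) (Ne.symm hcp)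
      have hpnot : (c :: rest).count p = 0 := by
        rw [List.count_eq_zero]
        intro hmem
        rcases List.mem_cons.mp hmem with h | h
        · exact hcp h.symm
        · exact absurd (hcle p h) (not_le.mpr hpc)
      have hcnt : ((c :: rest).count c : Int) = (rest.count c : Int) + 1 := by
        rw [List.count_cons_self]; push_cast; ring
      simp only [decide_eq_true_eq, if_neg hcp]
      by_cases hgt : (1 : Int) > num
      · simp only [if_pos hgt, true_iff]
        right
        refine ⟨c, List.mem_cons_self .., (ne_of_lt hpc).symm, ?_⟩
        omega
      · rw [if_neg hgt]
        rw [ih c 1 hpw' hcle]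
        constructor
        · rintro (⟨h1, h2⟩ | ⟨d, hd, hdne, hdc⟩)
          · right
            exact ⟨c, List.mem_cons_self .., (ne_of_lt hpc).symm, by omega⟩
          · right
            have hdp : d ≠ p := by
              intro h; subst h
              exact absurd (hcle d hd) (not_le.mpr hpc)
            refine ⟨d, List.mem_cons_of_mem _ hd, hdp, ?_⟩
            rwa [List.count_cons_of_ne (Ne.symm hdne)]
        · rintro (⟨h1, h2⟩ | ⟨d, hd, hdne, hdc⟩)
          · exfalso; rw [hpnot] at h1; exact absurd h1 (by omega)
          · rcases List.mem_cons.mp hd with h | h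
            · subst h
              by_cases hr : rest.count d = 0
              · exfalso; rw [hcnt] at hdc; omega
              · left; exact ⟨Nat.pos_of_ne_zero hr, by omega⟩
            · by_cases hdc' : d = c
              · subst hdc'
                by_cases hr : rest.count d = 0
                · exfalso; rw [hcnt] at hdc; omega
                · left; exact ⟨Nat.pos_of_ne_zero hr, by omega⟩
              · right
                exact ⟨d, h, hdc', by rwa [List.count_cons_of_ne (Ne.symm hdc')] at hdc⟩

-- the full scan starting from no previous character
theorem cdRun_none (num : Int) (l : List Char) (hpw : l.Pairwise (· ≤ ·)) :
    (cdRun num l none 0 = true ↔ ∃ c ∈ l, num < (l.count c : Int)) := by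
  cases l with
  | nil => simp [cdRun]
  | cons c rest =>
    have hpw' : rest.Pairwise (· ≤ ·) := hpw.tail
    have hcle : ∀ x ∈ rest, c ≤ x := fun x hx => (List.pairwise_cons.mp hpw).1 x hx
    have hcnt : ((c :: rest).count c : Int) = (rest.count c : Int) + 1 := by
      rw [List.count_cons_self]; push_cast; ring
    have hne : (some c == (none : Option Char)) = false := rfl
    simp only [cdRun, hne, if_false, Bool.false_eq_true]
    by_cases hgt : (1 : Int) > num
    · simp only [if_pos hgt, true_iff]
      exact ⟨c, List.mem_cons_self .., by omega⟩
    · rw [if_neg hgt]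
      rw [cdRun_some num rest c 1 hpw' hcle]
      constructor
      · rintro (⟨h1, h2⟩ | ⟨d, hd, hdne, hdc⟩)
        · exact ⟨c, List.mem_cons_self .., by omega⟩
        · exact ⟨d, List.mem_cons_of_mem _ hd, by rwa [List.count_cons_of_ne (Ne.symm hdne)]⟩
      · rintro ⟨d, hd, hdc⟩
        rcases List.mem_cons.mp hd with h | h
        · subst h
          by_cases hr : rest.count d = 0
          · exfalso; rw [hcnt] at hdc; omega
          · left; exact ⟨Nat.pos_of_ne_zero hr, by omega⟩
        · by_cases hdc' : d = c
          · subst hdc'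
            by_cases hr : rest.count d = 0
            · exfalso; rw [hcnt] at hdc; omega
            · left; exact ⟨Nat.pos_of_ne_zero hr, by omega⟩
          · right
            exact ⟨d, h, hdc', by rwa [List.count_cons_of_ne (Ne.symm hdc')] at hdc⟩

theorem countB_iff (xs : List Char) (num : Int) :
    (cdRun num (PySem.List.sorted xs (fun x => x) false) none 0 = true)
      ↔ ∃ c ∈ xs, num < (xs.count c : Int) := by
  set s := PySem.List.sorted xs (fun x => x) false with hs
  have hperm : s.Perm xs := PySem.List.sorted_perm ..
  have hpw : s.Pairwise (· ≤ ·) := by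
    have := PySem.List.sorted_pairwise (xs := xs) (key := fun x : Char => x)
    simpa [hs] using this
  rw [cdRun_none num s hpw]
  constructor
  · rintro ⟨c, hc, h⟩
    exact ⟨c, hperm.mem_iff.mp hc, by rwa [hperm.count_eq] at h⟩
  · rintro ⟨c, hc, h⟩
    exact ⟨c, hperm.mem_iff.mpr hc, by rwa [hperm.count_eq]⟩

-- ===== VERDICT (by name: the statement is the Claim_ definition above) =====
theorem count_duplicate_spec : Claim_equal_count_duplicate := by
  intro password num _
  unfold Spec_count_duplicate count_duplicate count_duplicate_alt
  rw [Bool.eq_iff_iff]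
  rw [countB_iff]
  exact countA_iff password.toList num
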